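-- pv_equiv track=rewrite | github.com/zizai/notebooks | utils/kolmogorov.py | calculate_bits
-- ===== SOURCE A (Python) =====
-- def calculate_bits(compressed_values):
--
--     size = len(compressed_values)
--     total_bits = 0
--
--     # characters are stored in 9-12 bits if compressed
--     # (characters are stored in 8 bits if uncompressed)
--     # if we need to move up a code width level, then we continue to use that
--     # code width level until we have to move up again
--     code_width = 0
--     for output in compressed_values:
--         if (output >= 0) and (output < 512) and (code_width < 9):
--             code_width = 9
--         if (output >= 512) and (output < 1024) and (code_width < 10):
--             code_width = 10
--         if (output >= 1024) and (output < 2048) and (code_width < 11):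
--             code_width = 11
--         if (output >= 2048) and (code_width < 12):
--             code_width = 12
--         total_bits += code_width
--
--     return total_bits
-- ===== SOURCE B (Python) =====
-- def calculate_bits(compressed_values):
--     # total_bits = sum of prefix maxima of per-value widths (0/9/10/11/12).
--     # Decompose the width by thresholds: width >= 9 once a value >= 0 has
--     # appeared, >= 10 once a value >= 512 appeared, >= 11 for >= 1024,
--     # >= 12 for >= 2048.  Each threshold t therefore contributes
--     # (n - first index reaching t) bits in total; no running state needed.
--     def tail_from(bound):
--         # number of positions from the first value >= bound to the end
--         for i, v in enumerate(compressed_values):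
--             if v >= bound:
--                 return len(compressed_values) - i
--         return 0
--
--     return 9 * tail_from(0) + tail_from(512) + tail_from(1024) + tail_from(2048)
-- ===== Notes on version B (the rewrite author's own statement) =====
-- stated objective: alternative
-- what changed: Replaces A's stateful loop (running code_width accumulated per element) with a stateless closed form: the answer is 9*(n-i9)+(n-i10)+(n-i11)+(n-i12) where i_t is the first index whose value reaches threshold 0/512/1024/2048, found by four independent first-match scans.
import Mathlib
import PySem

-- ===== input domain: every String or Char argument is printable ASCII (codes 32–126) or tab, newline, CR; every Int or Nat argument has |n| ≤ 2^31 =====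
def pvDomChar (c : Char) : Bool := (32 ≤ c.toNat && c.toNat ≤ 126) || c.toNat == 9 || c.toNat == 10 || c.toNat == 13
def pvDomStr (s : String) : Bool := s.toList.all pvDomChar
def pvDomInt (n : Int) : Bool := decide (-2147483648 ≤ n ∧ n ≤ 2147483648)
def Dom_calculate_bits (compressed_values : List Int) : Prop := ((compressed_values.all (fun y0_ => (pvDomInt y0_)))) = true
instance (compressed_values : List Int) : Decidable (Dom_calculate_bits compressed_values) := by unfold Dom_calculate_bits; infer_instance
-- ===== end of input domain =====

-- B replaces A's stateful loop with a threshold/first-occurrence closed form (alternative decomposition, same cost).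
-- ===== PORT A =====
-- step of A's loop body: the four sequential ifs updating code_width
def pvStepA (cw : Int) (output : Int) : Int :=
  let cw := if output ≥ 0 ∧ output < 512 ∧ cw < 9 then 9 else cw
  let cw := if output ≥ 512 ∧ output < 1024 ∧ cw < 10 then 10 else cw
  let cw := if output ≥ 1024 ∧ output < 2048 ∧ cw < 11 then 11 else cw
  let cw := if output ≥ 2048 ∧ cw < 12 then 12 else cw
  cw

def calculate_bits (compressed_values : List Int) : Int :=
  (compressed_values.foldl
    (fun st output =>
      let cw := pvStepA st.1 output
      (cw, st.2 + cw))
    ((0 : Int), (0 : Int))).2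

-- ===== PORT B =====
-- tail_from: number of positions from the first value ≥ bound to the end (0 if none)
def pvTailFrom (bound : Int) : List Int → Int
  | [] => 0
  | v :: r => if bound ≤ v then ((v :: r).length : Int) else pvTailFrom bound r

def calculate_bits_alt (compressed_values : List Int) : Int :=
  9 * pvTailFrom 0 compressed_values + pvTailFrom 512 compressed_values
    + pvTailFrom 1024 compressed_values + pvTailFrom 2048 compressed_values

-- ===== PRECONDITION & SPEC =====
def Spec_calculate_bits (compressed_values : List Int) (out : Int) : Prop := out = calculate_bits_alt compressed_values
instance (compressed_values : List Int) (out : Int) : Decidable (Spec_calculate_bits compressed_values out) := by unfold Spec_calculate_bits; infer_instance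

-- ===== CLAIM =====
def Claim_equal_calculate_bits : Prop := ∀ (compressed_values : List Int), Dom_calculate_bits compressed_values → Spec_calculate_bits compressed_values (calculate_bits compressed_values)

-- ===== LEMMAS AND PROOFS =====

-- per-value code-width level
def pvW (v : Int) : Int :=
  if v < 0 then 0 else if v < 512 then 9 else if v < 1024 then 10 else if v < 2048 then 11 else 12

-- value of the remaining fold given the current code width cw
def pvS (cw : Int) (xs : List Int) : Int :=
  (if 9 ≤ cw then 9 * (xs.length : Int) else 9 * pvTailFrom 0 xs)
  + (if 10 ≤ cw then 1 * (xs.length : Int) else 1 * pvTailFrom 512 xs)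
  + (if 11 ≤ cw then 1 * (xs.length : Int) else 1 * pvTailFrom 1024 xs)
  + (if 12 ≤ cw then 1 * (xs.length : Int) else 1 * pvTailFrom 2048 xs)

theorem pvStepA_eq_max (cw v : Int) (h : 0 ≤ cw) : pvStepA cw v = max cw (pvW v) := by
  simp only [pvStepA, pvW]
  split_ifs <;> omega

theorem pvW_iff (v : Int) :
    ((9 ≤ pvW v ↔ 0 ≤ v) ∧ (10 ≤ pvW v ↔ 512 ≤ v)) ∧
    ((11 ≤ pvW v ↔ 1024 ≤ v) ∧ (12 ≤ pvW v ↔ 2048 ≤ v)) := by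
  simp only [pvW]; split_ifs <;> omega

theorem pvW_mem (v : Int) : pvW v = 0 ∨ pvW v = 9 ∨ pvW v = 10 ∨ pvW v = 11 ∨ pvW v = 12 := by
  simp only [pvW]; split_ifs <;> omega

theorem pvComp_step (t bound cw cw' v coef : Int) (r : List Int)
    (hiff : t ≤ cw' ↔ (t ≤ cw ∨ bound ≤ v)) :
    (if t ≤ cw then coef * (((v :: r).length : Int)) else coef * pvTailFrom bound (v :: r))
      = (if t ≤ cw' then coef * ((r.length : Int)) else coef * pvTailFrom bound r)
        + (if t ≤ cw' then coef else 0) := by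
  by_cases h1 : t ≤ cw <;> by_cases h2 : bound ≤ v <;>
    simp only [pvTailFrom, hiff, h1, h2, List.length_cons, or_true, or_false, if_pos,
      if_neg, not_false_iff] <;>
    push_cast <;> first | ring | (split_ifs <;> omega) | omega

theorem pvSum_ind (c : Int) (h : c = 0 ∨ c = 9 ∨ c = 10 ∨ c = 11 ∨ c = 12) :
    c = (if 9 ≤ c then (9 : Int) else 0) + (if 10 ≤ c then (1 : Int) else 0)
        + (if 11 ≤ c then (1 : Int) else 0) + (if 12 ≤ c then (1 : Int) else 0) := by
  rcases h with h|h|h|h|h <;> subst h <;> norm_num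

theorem pvS_step (cw v : Int) (r : List Int)
    (hcw : cw = 0 ∨ cw = 9 ∨ cw = 10 ∨ cw = 11 ∨ cw = 12) :
    pvStepA cw v + pvS (pvStepA cw v) r = pvS cw (v :: r) := by
  have h0 : (0 : Int) ≤ cw := by rcases hcw with h|h|h|h|h <;> omega
  rw [pvStepA_eq_max cw v h0]
  obtain ⟨⟨i9, i10⟩, i11, i12⟩ := pvW_iff v
  have m9 : 9 ≤ max cw (pvW v) ↔ (9 ≤ cw ∨ 0 ≤ v) := by rw [le_max_iff, i9]
  have m10 : 10 ≤ max cw (pvW v) ↔ (10 ≤ cw ∨ 512 ≤ v) := by rw [le_max_iff, i10]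
  have m11 : 11 ≤ max cw (pvW v) ↔ (11 ≤ cw ∨ 1024 ≤ v) := by rw [le_max_iff, i11]
  have m12 : 12 ≤ max cw (pvW v) ↔ (12 ≤ cw ∨ 2048 ≤ v) := by rw [le_max_iff, i12]
  have hmem : max cw (pvW v) = 0 ∨ max cw (pvW v) = 9 ∨ max cw (pvW v) = 10 ∨
      max cw (pvW v) = 11 ∨ max cw (pvW v) = 12 := by
    rcases max_choice cw (pvW v) with h | h <;> rw [h]
    · exact hcw
    · exact pvW_mem v
  simp only [pvS]
  rw [pvComp_step 9 0 cw (max cw (pvW v)) v 9 r m9,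
      pvComp_step 10 512 cw (max cw (pvW v)) v 1 r m10,
      pvComp_step 11 1024 cw (max cw (pvW v)) v 1 r m11,
      pvComp_step 12 2048 cw (max cw (pvW v)) v 1 r m12]
  linarith [pvSum_ind (max cw (pvW v)) hmem]

theorem pvA_fold (xs : List Int) : ∀ (cw t : Int),
    (cw = 0 ∨ cw = 9 ∨ cw = 10 ∨ cw = 11 ∨ cw = 12) →
    (xs.foldl (fun st output => let cw := pvStepA st.1 output; (cw, st.2 + cw)) (cw, t)).2
      = t + pvS cw xs := by
  induction xs with
  | nil => intro cw t _; simp [pvS, pvTailFrom]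
  | cons v r ih =>
    intro cw t hcw
    simp only [List.foldl_cons]
    have h0 : (0 : Int) ≤ cw := by rcases hcw with h|h|h|h|h <;> omega
    have hstep : (pvStepA cw v = 0 ∨ pvStepA cw v = 9 ∨ pvStepA cw v = 10 ∨
        pvStepA cw v = 11 ∨ pvStepA cw v = 12) := by
      rw [pvStepA_eq_max cw v h0]
      rcases max_choice cw (pvW v) with h | h <;> rw [h]
      · exact hcw
      · exact pvW_mem v
    rw [ih (pvStepA cw v) (t + pvStepA cw v) hstep]
    have key := pvS_step cw v r hcw
    omega

-- ===== VERDICT =====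
theorem calculate_bits_spec : Claim_equal_calculate_bits := by
  intro xs _
  show calculate_bits xs = calculate_bits_alt xs
  unfold calculate_bits calculate_bits_alt
  rw [pvA_fold xs 0 0 (Or.inl rfl)]
  simp [pvS]
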